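-- pv_equiv track=rewrite | github.com/bizmaster66/startup_analyzer | app.py | _resolve_node_key
-- ===== SOURCE A (Python) =====
-- from typing import Optional, List, Dict, Any
--
-- def _resolve_node_key(name: str, node_labels: Dict[str, str]) -> str:
--     text = str(name or "").strip()
--     if not text:
--         return ""
--     for key, label in node_labels.items():
--         if text == label:
--             return key
--     for key, label in node_labels.items():
--         if text in label or label in text:
--             return key
--     return ""
-- ===== SOURCE B (Python) =====
-- def _resolve_node_key(name, node_labels):
--     text = str(name or "").strip()
--     if not text:
--         return ""
--     candidate = None
--     for key, label in node_labels.items():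
--         if text == label:
--             return key
--         if candidate is None and (text in label or label in text):
--             candidate = key
--     return candidate if candidate is not None else ""
-- ===== Notes on version B (the rewrite author's own statement) =====
-- stated objective: simpler
-- what changed: Replaces A's two sequential scans (exact pass, then substring pass) with a single pass that records the first substring-match key in a candidate variable while still returning immediately on an exact label match.
import Mathlib
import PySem

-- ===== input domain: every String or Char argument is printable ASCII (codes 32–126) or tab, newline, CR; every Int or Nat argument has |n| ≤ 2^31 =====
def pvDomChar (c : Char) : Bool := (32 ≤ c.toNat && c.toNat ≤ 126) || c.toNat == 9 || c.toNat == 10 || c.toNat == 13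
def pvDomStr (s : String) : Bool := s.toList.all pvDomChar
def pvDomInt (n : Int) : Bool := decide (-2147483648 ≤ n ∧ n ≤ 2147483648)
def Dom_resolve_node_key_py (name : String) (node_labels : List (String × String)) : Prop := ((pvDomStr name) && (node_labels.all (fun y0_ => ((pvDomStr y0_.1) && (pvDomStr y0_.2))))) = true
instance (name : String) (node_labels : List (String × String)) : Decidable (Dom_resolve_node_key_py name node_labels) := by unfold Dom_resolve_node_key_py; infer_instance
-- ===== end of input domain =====

-- ===== PORT A =====
-- two sequential scans: exact-label pass, then substring pass
def aExactScan (text : String) : List (String × String) → Option String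
  | [] => none
  | (k, l) :: rest => if text = l then some k else aExactScan text rest

def aSubScan (text : String) : List (String × String) → Option String
  | [] => none
  | (k, l) :: rest =>
      if PySem.Str.isIn text l || PySem.Str.isIn l text then some k
      else aSubScan text rest

def resolve_node_key_py (name : String) (node_labels : List (String × String)) : String :=
  let text := PySem.Str.strip (if name = "" then "" else name)
  if text = "" then ""
  else
    match aExactScan text node_labels with
    | some k => k
    | none =>
      match aSubScan text node_labels with
      | some k => k
      | none => ""

-- ===== PORT B =====
-- single pass keeping the first substring-match key as a candidate
def bScan (text : String) (cand : Option String) : List (String × String) → String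
  | [] => cand.getD ""
  | (k, l) :: rest =>
      if text = l then k
      else if cand.isNone && (PySem.Str.isIn text l || PySem.Str.isIn l text) then
        bScan text (some k) rest
      else bScan text cand rest

def resolve_node_key_py_alt (name : String) (node_labels : List (String × String)) : String :=
  let text := PySem.Str.strip (if name = "" then "" else name)
  if text = "" then ""
  else bScan text none node_labels

-- ===== PRECONDITION & SPEC =====
def Spec_resolve_node_key_py (name : String) (node_labels : List (String × String)) (out : String) : Prop := out = resolve_node_key_py_alt name node_labels
instance (name : String) (node_labels : List (String × String)) (out : String) : Decidable (Spec_resolve_node_key_py name node_labels out) := by unfold Spec_resolve_node_key_py; infer_instance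

-- ===== CLAIM (what is proved, stated in full; the proofs are below) =====
def Claim_equal_resolve_node_key_py : Prop := ∀ (name : String) (node_labels : List (String × String)), Dom_resolve_node_key_py name node_labels → Spec_resolve_node_key_py name node_labels (resolve_node_key_py name node_labels)

-- ===== LEMMAS AND PROOFS =====
theorem bScan_eq (text : String) (ls : List (String × String)) :
    ∀ cand : Option String,
      bScan text cand ls =
        match aExactScan text ls with
        | some k => k
        | none =>
          match cand with
          | some c => c
          | none =>
            match aSubScan text ls with
            | some k => k
            | none => "" := by
  induction ls with
  | nil => intro cand; cases cand <;> simp [bScan, aExactScan, aSubScan, Option.getD]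
  | cons p rest ih =>
    intro cand
    obtain ⟨k, l⟩ := p
    by_cases he : text = l
    · simp [bScan, aExactScan, he]
    · cases cand with
      | some c =>
        simp [bScan, aExactScan, he, Option.isNone, ih]
      | none =>
        by_cases hs : (PySem.Str.isIn text l || PySem.Str.isIn l text) = true
        all_goals
          simp only [PySem.Str.isIn_eq, Bool.or_eq_true] at hs
          simp [bScan, aExactScan, aSubScan, he, hs, Option.isNone, ih]

-- ===== VERDICT (by name: the statement is the Claim_ definition above) =====
theorem resolve_node_key_py_spec : Claim_equal_resolve_node_key_py := by
  intro name node_labels _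
  unfold Spec_resolve_node_key_py resolve_node_key_py resolve_node_key_py_alt
  by_cases h : PySem.Str.strip (if name = "" then "" else name) = ""
  · simp [h]
  · simp [h, bScan_eq]
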